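-- pv_equiv track=rewrite | github.com/fengchangfight/fcleetcode | 5_Longest_Palindromic_Substring/Longest_Palindromic_Substring.py | palindromeatpoint
-- ===== SOURCE A (Python) =====
-- def palindromeatpoint(s, index):
--     if(s==None or len(s)==0 or index<0 or index>=len(s)):
--         return None
--     i=j=1
--     oddsize = 1
--     while(index-i>=0 and index+i<len(s)):
--         if(s[index-i]==s[index+i]):
--             oddsize+=2
--             i += 1
--         else:
--             break
--     if(index<len(s)-1 and s[index]==s[index+1]):
--         evensize = 2
--         while (index - j >= 0 and index + 1 + j < len(s)):
--             if (s[index - j] == s[index + 1 + j]):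
--                 evensize += 2
--                 j += 1
--             else:
--                 break
--     else:
--         evensize = -1
--     if(evensize > oddsize):
--         start = index - j + 1
--         return s[start:start+evensize]
--     else:
--         start = index - i + 1
--         return s[start:start+oddsize]
-- ===== SOURCE B (Python) =====
-- def palindromeatpoint(s, index):
--     if s is None or len(s) == 0 or index < 0 or index >= len(s):
--         return None
--     n = len(s)
--
--     def longest(off, kmax):
--         # scan candidate radii top-down; first palindromic candidate is the longest
--         for k in range(kmax, -1, -1):
--             t = s[index - k:index + k + off]
--             if t == t[::-1]:
--                 return t
--         return ''
--
--     odd = longest(1, min(index, n - 1 - index))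
--     even = longest(2, min(index, n - 2 - index))
--     return even if len(even) > len(odd) else odd
-- ===== Notes on version B (the rewrite author's own statement) =====
-- stated objective: alternative
-- what changed: Replaces A's two centre-expansion pointer loops (i/j with size accumulators and an evensize=-1 sentinel) by a top-down scan over candidate radii that slices each candidate substring and tests it for palindromicity by comparing it with its reversal, returning the first (longest) hit.
import Mathlib
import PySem

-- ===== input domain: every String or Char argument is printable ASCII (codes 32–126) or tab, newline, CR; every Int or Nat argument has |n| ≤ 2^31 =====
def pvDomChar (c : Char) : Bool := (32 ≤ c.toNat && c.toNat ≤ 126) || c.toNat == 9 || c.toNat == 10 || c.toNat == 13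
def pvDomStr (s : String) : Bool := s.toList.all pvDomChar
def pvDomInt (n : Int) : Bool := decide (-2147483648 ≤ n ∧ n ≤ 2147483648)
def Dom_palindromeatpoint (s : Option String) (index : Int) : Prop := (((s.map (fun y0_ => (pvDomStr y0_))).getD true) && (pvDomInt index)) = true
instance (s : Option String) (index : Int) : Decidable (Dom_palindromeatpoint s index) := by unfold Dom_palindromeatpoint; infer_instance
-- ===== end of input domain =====

-- B replaces A's two centre-expansion pointer loops by a top-down scan over candidate
-- radii, slicing each candidate and testing palindromicity by comparison with its
-- reversal (objective: alternative — same result, different algorithm, not faster).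

-- ===== PORT A =====
-- A's odd while-loop over (i, oddsize); fuel = cs.length bounds the iterations (i ≤ index < len).
def pvA_odd (cs : List Char) (index : Int) : Nat → Int → Int → Int × Int
  | 0, i, oddsize => (i, oddsize)
  | fuel+1, i, oddsize =>
    if index - i ≥ 0 ∧ index + i < (cs.length : Int) then
      if PySem.List.pyGet? cs (index - i) = PySem.List.pyGet? cs (index + i) then
        pvA_odd cs index fuel (i+1) (oddsize+2)
      else (i, oddsize)
    else (i, oddsize)

-- A's even while-loop over (j, evensize).
def pvA_even (cs : List Char) (index : Int) : Nat → Int → Int → Int × Int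
  | 0, j, evensize => (j, evensize)
  | fuel+1, j, evensize =>
    if index - j ≥ 0 ∧ index + 1 + j < (cs.length : Int) then
      if PySem.List.pyGet? cs (index - j) = PySem.List.pyGet? cs (index + 1 + j) then
        pvA_even cs index fuel (j+1) (evensize+2)
      else (j, evensize)
    else (j, evensize)

def palindromeatpoint (s : Option String) (index : Int) : Option String :=
  match s with
  | none => none
  | some str =>
    let cs := str.toList
    if cs.length = 0 ∨ index < 0 ∨ index ≥ (cs.length : Int) then none
    else
      let oi := pvA_odd cs index cs.length 1 1
      let i := oi.1
      let oddsize := oi.2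
      let je : Int × Int :=
        if index < (cs.length : Int) - 1 ∧
            PySem.List.pyGet? cs index = PySem.List.pyGet? cs (index+1) then
          pvA_even cs index cs.length 1 2
        else (1, -1)
      let j := je.1
      let evensize := je.2
      if evensize > oddsize then
        let start := index - j + 1
        some (String.ofList (PySem.List.slice cs (some start) (some (start + evensize))))
      else
        let start := index - i + 1
        some (String.ofList (PySem.List.slice cs (some start) (some (start + oddsize))))

-- ===== PORT B =====
-- B's 'for k in range(kmax, -1, -1)' loop: cnt counts the remaining iterations
-- (cnt = kmax+1 at entry, current radius k = cnt-1); first palindromic candidate is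
-- returned, '' if the range is exhausted.  t == t[::-1] is t = t.reverse (PySem.List.slice?_none_none_neg_one).
def pvB_longest (cs : List Char) (index off : Int) : Nat → List Char
  | 0 => []
  | cnt+1 =>
    let k : Int := (cnt : Int)
    let t := PySem.List.slice cs (some (index - k)) (some (index + k + off))
    if t = t.reverse then t else pvB_longest cs index off cnt

def palindromeatpoint_alt (s : Option String) (index : Int) : Option String :=
  match s with
  | none => none
  | some str =>
    let cs := str.toList
    if cs.length = 0 ∨ index < 0 ∨ index ≥ (cs.length : Int) then none
    else
      let n : Int := cs.length
      let odd := pvB_longest cs index 1 ((min index (n - 1 - index)) + 1).toNat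
      let even := pvB_longest cs index 2 ((min index (n - 2 - index)) + 1).toNat
      some (String.ofList (if even.length > odd.length then even else odd))

-- ===== PRECONDITION & SPEC =====
def Spec_palindromeatpoint (s : Option String) (index : Int) (out : Option String) : Prop := out = palindromeatpoint_alt s index
instance (s : Option String) (index : Int) (out : Option String) : Decidable (Spec_palindromeatpoint s index out) := by unfold Spec_palindromeatpoint; infer_instance

-- ===== CLAIM (what is proved, stated in full; the proofs are below) =====
def Claim_equal_palindromeatpoint : Prop := ∀ (s : Option String) (index : Int), Dom_palindromeatpoint s index → Spec_palindromeatpoint s index (palindromeatpoint s index)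

-- ===== LEMMAS AND PROOFS =====

-- A's odd loop size accumulator: oddsize grows by 2 per step of i.
theorem pvA_odd_size (cs : List Char) (index : Int) :
    ∀ (F : Nat) (i sz : Int),
      (pvA_odd cs index F i sz).2 = sz + 2 * ((pvA_odd cs index F i sz).1 - i) := by
  intro F
  induction F with
  | zero => intro i sz; simp [pvA_odd]
  | succ F ih =>
    intro i sz
    simp only [pvA_odd]
    split_ifs with h1 h2
    · rw [ih]; ring
    · simp
    · simp

theorem pvA_even_size (cs : List Char) (index : Int) :
    ∀ (F : Nat) (j sz : Int),
      (pvA_even cs index F j sz).2 = sz + 2 * ((pvA_even cs index F j sz).1 - j) := by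
  intro F
  induction F with
  | zero => intro j sz; simp [pvA_even]
  | succ F ih =>
    intro j sz
    simp only [pvA_even]
    split_ifs with h1 h2
    · rw [ih]; ring
    · simp
    · simp

-- Loop invariant of A's odd loop: i only grows, and the last accepted expansion stayed in range.
theorem pvA_odd_bounds (cs : List Char) (index : Int) :
    ∀ (F : Nat) (i sz : Int), 0 ≤ index - (i - 1) → index + (i - 1) < (cs.length : Int) →
      i ≤ (pvA_odd cs index F i sz).1 ∧
      0 ≤ index - ((pvA_odd cs index F i sz).1 - 1) ∧
      index + ((pvA_odd cs index F i sz).1 - 1) < (cs.length : Int) := by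
  intro F
  induction F with
  | zero => intro i sz h1 h2; simp [pvA_odd]; omega
  | succ F ih =>
    intro i sz h1 h2
    simp only [pvA_odd]
    split_ifs with hc he
    · have := ih (i+1) (sz+2) (by omega) (by omega)
      exact ⟨by omega, this.2⟩
    · simp; omega
    · simp; omega

theorem pvA_even_bounds (cs : List Char) (index : Int) :
    ∀ (F : Nat) (j sz : Int), 0 ≤ index - (j - 1) → index + 1 + (j - 1) < (cs.length : Int) →
      j ≤ (pvA_even cs index F j sz).1 ∧
      0 ≤ index - ((pvA_even cs index F j sz).1 - 1) ∧
      index + 1 + ((pvA_even cs index F j sz).1 - 1) < (cs.length : Int) := by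
  intro F
  induction F with
  | zero => intro j sz h1 h2; simp [pvA_even]; omega
  | succ F ih =>
    intro j sz h1 h2
    simp only [pvA_even]
    split_ifs with hc he
    · have := ih (j+1) (sz+2) (by omega) (by omega)
      exact ⟨by omega, this.2⟩
    · simp; omega
    · simp; omega

-- All positions strictly before the final i matched.
theorem pvA_odd_match (cs : List Char) (index : Int) :
    ∀ (F : Nat) (i sz : Int) (m : Int), i ≤ m → m < (pvA_odd cs index F i sz).1 →
      PySem.List.pyGet? cs (index - m) = PySem.List.pyGet? cs (index + m) := by
  intro F
  induction F with
  | zero => intro i sz m h1 h2; simp [pvA_odd] at h2; omega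
  | succ F ih =>
    intro i sz m h1 h2
    simp only [pvA_odd] at h2 ⊢
    split_ifs at h2 with hc he
    · rcases eq_or_lt_of_le h1 with h | h
      · subst h; exact he
      · exact ih (i+1) (sz+2) m (by omega) h2
    · omega
    · omega

theorem pvA_even_match (cs : List Char) (index : Int) :
    ∀ (F : Nat) (j sz : Int) (m : Int), j ≤ m → m < (pvA_even cs index F j sz).1 →
      PySem.List.pyGet? cs (index - m) = PySem.List.pyGet? cs (index + 1 + m) := by
  intro F
  induction F with
  | zero => intro j sz m h1 h2; simp [pvA_even] at h2; omega
  | succ F ih =>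
    intro j sz m h1 h2
    simp only [pvA_even] at h2 ⊢
    split_ifs at h2 with hc he
    · rcases eq_or_lt_of_le h1 with h | h
      · subst h; exact he
      · exact ih (j+1) (sz+2) m (by omega) h2
    · omega
    · omega

-- If fuel did not run out, the loop really stopped on a failed condition.
theorem pvA_odd_stop (cs : List Char) (index : Int) :
    ∀ (F : Nat) (i sz : Int), (pvA_odd cs index F i sz).1 < i + F →
      ¬ (index - (pvA_odd cs index F i sz).1 ≥ 0 ∧ index + (pvA_odd cs index F i sz).1 < (cs.length : Int) ∧
         PySem.List.pyGet? cs (index - (pvA_odd cs index F i sz).1) = PySem.List.pyGet? cs (index + (pvA_odd cs index F i sz).1)) := by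
  intro F
  induction F with
  | zero => intro i sz h; simp [pvA_odd] at h
  | succ F ih =>
    intro i sz h
    simp only [pvA_odd] at h ⊢
    by_cases hc : index - i ≥ 0 ∧ index + i < (cs.length : Int)
    · by_cases he : PySem.List.pyGet? cs (index - i) = PySem.List.pyGet? cs (index + i)
      · rw [if_pos hc, if_pos he] at h ⊢
        exact ih (i+1) (sz+2) (by omega)
      · rw [if_pos hc, if_neg he]
        intro hcon; exact he hcon.2.2
    · rw [if_neg hc]
      intro hcon; exact hc ⟨hcon.1, hcon.2.1⟩

theorem pvA_even_stop (cs : List Char) (index : Int) :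
    ∀ (F : Nat) (j sz : Int), (pvA_even cs index F j sz).1 < j + F →
      ¬ (index - (pvA_even cs index F j sz).1 ≥ 0 ∧ index + 1 + (pvA_even cs index F j sz).1 < (cs.length : Int) ∧
         PySem.List.pyGet? cs (index - (pvA_even cs index F j sz).1) = PySem.List.pyGet? cs (index + 1 + (pvA_even cs index F j sz).1)) := by
  intro F
  induction F with
  | zero => intro j sz h; simp [pvA_even] at h
  | succ F ih =>
    intro j sz h
    simp only [pvA_even] at h ⊢
    by_cases hc : index - j ≥ 0 ∧ index + 1 + j < (cs.length : Int)
    · by_cases he : PySem.List.pyGet? cs (index - j) = PySem.List.pyGet? cs (index + 1 + j)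
      · rw [if_pos hc, if_pos he] at h ⊢
        exact ih (j+1) (sz+2) (by omega)
      · rw [if_pos hc, if_neg he]
        intro hcon; exact he hcon.2.2
    · rw [if_neg hc]
      intro hcon; exact hc ⟨hcon.1, hcon.2.1⟩

-- A list equals its reverse iff every position matches its mirror.
theorem pal_iff_pairs {α : Type} (l : List α) :
    l = l.reverse ↔ ∀ p, p < l.length → l[p]? = l[l.length - 1 - p]? := by
  constructor
  · intro h p hp
    conv_lhs => rw [h]
    rw [List.getElem?_reverse hp]
  · intro h
    apply List.ext_getElem?
    intro i
    by_cases hi : i < l.length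
    · rw [List.getElem?_reverse hi]
      exact h i hi
    · rw [List.getElem?_eq_none (by simpa using hi), List.getElem?_eq_none (by simp; omega)]

-- An in-range candidate slice is a palindrome iff all centre pairs match.
theorem pal_slice_iff (cs : List Char) (index : Int) (k : Nat) (off : Nat)
    (hoff : off = 1 ∨ off = 2) (h0 : 0 ≤ index - k) (hr : index + k + off ≤ (cs.length : Int)) :
    (PySem.List.slice cs (some (index - k)) (some (index + k + off)) =
      (PySem.List.slice cs (some (index - k)) (some (index + k + off))).reverse)
    ↔ ∀ m : Nat, m ≤ k →
        PySem.List.pyGet? cs (index - m) = PySem.List.pyGet? cs (index + m + off - 1) := by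
  have hoff1 : 1 ≤ off := by rcases hoff with h | h <;> omega
  have hoff2 : off ≤ 2 := by rcases hoff with h | h <;> omega
  rw [PySem.List.slice_toNat cs h0 (by omega)]
  set d := (index - (k:Int)).toNat with hd
  have hdk : (d : Int) = index - k := by omega
  have hL : (index + k + off).toNat - d = 2*k + off := by omega
  rw [hL]
  have hlen : ((cs.drop d).take (2*k+off)).length = 2*k+off := by
    simp [List.length_take, List.length_drop]; omega
  have hget : ∀ p, p < 2*k+off → ((cs.drop d).take (2*k+off))[p]? = cs[d+p]? := by
    intro p hp
    rw [List.getElem?_take_of_lt hp, List.getElem?_drop]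
  have conv1 : ∀ z : Int, 0 ≤ z → PySem.List.pyGet? cs z = cs[z.toNat]? :=
    fun z hz => PySem.List.pyGet?_of_nonneg cs hz
  rw [pal_iff_pairs]
  simp only [hlen]
  constructor
  · intro h m hm
    have hx := h (k - m) (by omega)
    rw [hget _ (by omega), hget _ (by omega)] at hx
    rw [conv1 (index - m) (by omega), conv1 (index + m + off - 1) (by omega)]
    have e1 : (index - m).toNat = d + (k - m) := by omega
    have e2 : (index + m + off - 1).toNat = d + (2*k+off - 1 - (k-m)) := by omega
    rw [e1, e2]; exact hx
  · intro h p hp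
    rw [hget _ hp, hget _ (by omega)]
    by_cases hpk : p ≤ k
    · have hx := h (k - p) (by omega)
      rw [conv1 (index - ((k-p : Nat) : Int)) (by omega),
          conv1 (index + ((k-p : Nat) : Int) + off - 1) (by omega)] at hx
      have e1 : d + p = (index - ((k-p : Nat) : Int)).toNat := by omega
      have e2 : d + (2*k+off-1-p) = (index + ((k-p : Nat) : Int) + off - 1).toNat := by omega
      rw [e1, e2]; exact hx
    · have hx := h (p - k - (off - 1)) (by omega)
      rw [conv1 (index - ((p-k-(off-1) : Nat) : Int)) (by omega),
          conv1 (index + ((p-k-(off-1) : Nat) : Int) + off - 1) (by omega)] at hx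
      have e1 : d + p = (index + ((p-k-(off-1) : Nat) : Int) + off - 1).toNat := by omega
      have e2 : d + (2*k+off-1-p) = (index - ((p-k-(off-1) : Nat) : Int)).toNat := by omega
      rw [e1, e2]; exact hx.symm

-- B's scan returns the candidate at the largest admissible radius that is a palindrome.
theorem pvB_longest_eq (cs : List Char) (index off : Int) (K : Nat)
    (hpal : PySem.List.slice cs (some (index - K)) (some (index + K + off)) =
            (PySem.List.slice cs (some (index - K)) (some (index + K + off))).reverse) :
    ∀ cnt, K < cnt →
      (∀ k : Nat, K < k → k < cnt →
        ¬ (PySem.List.slice cs (some (index - k)) (some (index + k + off)) =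
           (PySem.List.slice cs (some (index - k)) (some (index + k + off))).reverse)) →
      pvB_longest cs index off cnt =
        PySem.List.slice cs (some (index - K)) (some (index + K + off)) := by
  intro cnt
  induction cnt with
  | zero => intro h; omega
  | succ cnt ih =>
    intro hK hnot
    simp only [pvB_longest]
    rcases eq_or_lt_of_le (Nat.lt_succ_iff.mp hK) with h | h
    · subst h; rw [if_pos hpal]
    · rw [if_neg (hnot cnt h (by omega))]
      exact ih h (fun k hk1 hk2 => hnot k hk1 (by omega))

-- B's scan with no palindromic candidate returns ''.
theorem pvB_longest_nil (cs : List Char) (index off : Int) :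
    ∀ cnt,
      (∀ k : Nat, k < cnt →
        ¬ (PySem.List.slice cs (some (index - k)) (some (index + k + off)) =
           (PySem.List.slice cs (some (index - k)) (some (index + k + off))).reverse)) →
      pvB_longest cs index off cnt = [] := by
  intro cnt
  induction cnt with
  | zero => intro _; simp [pvB_longest]
  | succ cnt ih =>
    intro hnot
    simp only [pvB_longest]
    rw [if_neg (hnot cnt (by omega))]
    exact ih (fun k hk => hnot k (by omega))

-- pal_slice_iff specialised to the odd (off = 1) and even (off = 2) candidates.
theorem pal_slice_iff1 (cs : List Char) (index : Int) (k : Nat)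
    (h0 : 0 ≤ index - k) (hr : index + k + 1 ≤ (cs.length : Int)) :
    (PySem.List.slice cs (some (index - k)) (some (index + k + 1)) =
      (PySem.List.slice cs (some (index - k)) (some (index + k + 1))).reverse)
    ↔ ∀ m : Nat, m ≤ k →
        PySem.List.pyGet? cs (index - m) = PySem.List.pyGet? cs (index + m) := by
  rw [show (index + (k:Int) + 1) = (index + (k:Int) + ((1:Nat):Int)) from by push_cast; ring]
  rw [pal_slice_iff cs index k 1 (Or.inl rfl) h0 (by push_cast at hr ⊢; omega)]
  constructor
  · intro h m hm
    have hx := h m hm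
    rw [show index + (m:Int) + ((1:Nat):Int) - 1 = index + (m:Int) from by push_cast; ring] at hx
    exact hx
  · intro h m hm
    rw [show index + (m:Int) + ((1:Nat):Int) - 1 = index + (m:Int) from by push_cast; ring]
    exact h m hm

theorem pal_slice_iff2 (cs : List Char) (index : Int) (k : Nat)
    (h0 : 0 ≤ index - k) (hr : index + k + 2 ≤ (cs.length : Int)) :
    (PySem.List.slice cs (some (index - k)) (some (index + k + 2)) =
      (PySem.List.slice cs (some (index - k)) (some (index + k + 2))).reverse)
    ↔ ∀ m : Nat, m ≤ k →
        PySem.List.pyGet? cs (index - m) = PySem.List.pyGet? cs (index + 1 + m) := by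
  rw [show (index + (k:Int) + 2) = (index + (k:Int) + ((2:Nat):Int)) from by push_cast; ring]
  rw [pal_slice_iff cs index k 2 (Or.inr rfl) h0 (by push_cast at hr ⊢; omega)]
  constructor
  · intro h m hm
    have hx := h m hm
    rw [show index + (m:Int) + ((2:Nat):Int) - 1 = index + 1 + (m:Int) from by push_cast; ring] at hx
    exact hx
  · intro h m hm
    rw [show index + (m:Int) + ((2:Nat):Int) - 1 = index + 1 + (m:Int) from by push_cast; ring]
    exact h m hm

-- Length of a slice whose bounds are in range.
theorem slice_length_of_range (cs : List Char) (a b : Int) (ha : 0 ≤ a) (hab : a ≤ b)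
    (hb : b ≤ (cs.length : Int)) :
    ((PySem.List.slice cs (some a) (some b)).length : Int) = b - a := by
  rw [PySem.List.slice_toNat cs ha (le_trans ha hab)]
  simp [List.length_take, List.length_drop]
  omega

-- ===== VERDICT (by name: the statement is the Claim_ definition above) =====
theorem palindromeatpoint_spec : Claim_equal_palindromeatpoint := by
  intro s index _
  unfold Spec_palindromeatpoint
  match s with
  | none => rfl
  | some str =>
    show palindromeatpoint (some str) index = palindromeatpoint_alt (some str) index
    unfold palindromeatpoint palindromeatpoint_alt
    simp only
    by_cases hg : str.toList.length = 0 ∨ index < 0 ∨ index ≥ (str.toList.length : Int)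
    · rw [if_pos hg, if_pos hg]
    · rw [if_neg hg, if_neg hg]
      set cs := str.toList with hcs
      push Not at hg
      obtain ⟨hne, hi0, hiL⟩ := hg
      -- A's odd loop
      have hOb := pvA_odd_bounds cs index cs.length 1 1 (by omega) (by omega)
      have hOs := pvA_odd_size cs index cs.length 1 1
      have hOstop := pvA_odd_stop cs index cs.length 1 1 (by omega)
      have hOm := pvA_odd_match cs index cs.length 1 1
      set iF := (pvA_odd cs index cs.length 1 1).1 with hiF
      -- radius of the odd palindrome, as a Nat
      set rN : Nat := (iF - 1).toNat with hrN
      have hrNc : (rN : Int) = iF - 1 := by omega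
      -- B's odd scan returns the candidate of radius rN
      have hOpal : PySem.List.slice cs (some (index - (rN:Int))) (some (index + (rN:Int) + 1)) =
          (PySem.List.slice cs (some (index - (rN:Int))) (some (index + (rN:Int) + 1))).reverse := by
        rw [pal_slice_iff1 cs index rN (by omega) (by omega)]
        intro m hm
        rcases Nat.eq_zero_or_pos m with h | h
        · subst h; norm_num
        · have := hOm (m:Int) (by omega) (by omega)
          exact this
      have hBodd : pvB_longest cs index 1 ((min index ((cs.length:Int) - 1 - index)) + 1).toNat =
          PySem.List.slice cs (some (index - (rN:Int))) (some (index + (rN:Int) + 1)) := by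
        apply pvB_longest_eq cs index 1 rN hOpal _ (by omega)
        intro k hk1 hk2 hpal
        rw [pal_slice_iff1 cs index k (by omega) (by omega)] at hpal
        have := hpal iF.toNat (by omega)
        rw [show ((iF.toNat : Nat) : Int) = iF from by omega] at this
        exact hOstop ⟨by omega, by omega, this⟩
      have hloddN : (PySem.List.slice cs (some (index - (rN:Int))) (some (index + (rN:Int) + 1))).length
          = 2*rN + 1 := by
        have := slice_length_of_range cs (index - rN) (index + rN + 1) (by omega) (by omega) (by omega)
        omega
      by_cases hev : index < (cs.length : Int) - 1 ∧
          PySem.List.pyGet? cs index = PySem.List.pyGet? cs (index+1)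
      · -- even branch taken by A
        rw [if_pos hev]
        have hEb := pvA_even_bounds cs index cs.length 1 2 (by omega) (by omega)
        have hEs := pvA_even_size cs index cs.length 1 2
        have hEstop := pvA_even_stop cs index cs.length 1 2 (by omega)
        have hEm := pvA_even_match cs index cs.length 1 2
        set jF := (pvA_even cs index cs.length 1 2).1 with hjF
        set rE : Nat := (jF - 1).toNat with hrE
        have hrEc : (rE : Int) = jF - 1 := by omega
        have hEpal : PySem.List.slice cs (some (index - (rE:Int))) (some (index + (rE:Int) + 2)) =
            (PySem.List.slice cs (some (index - (rE:Int))) (some (index + (rE:Int) + 2))).reverse := by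
          rw [pal_slice_iff2 cs index rE (by omega) (by omega)]
          intro m hm
          rcases Nat.eq_zero_or_pos m with h | h
          · subst h
            simpa using hev.2
          · have := hEm (m:Int) (by omega) (by omega)
            exact this
        have hBeven : pvB_longest cs index 2 ((min index ((cs.length:Int) - 2 - index)) + 1).toNat =
            PySem.List.slice cs (some (index - (rE:Int))) (some (index + (rE:Int) + 2)) := by
          apply pvB_longest_eq cs index 2 rE hEpal _ (by omega)
          intro k hk1 hk2 hpal
          rw [pal_slice_iff2 cs index k (by omega) (by omega)] at hpal
          have := hpal jF.toNat (by omega)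
          rw [show ((jF.toNat : Nat) : Int) = jF from by omega] at this
          exact hEstop ⟨by omega, by omega, this⟩
        have hlevenN : (PySem.List.slice cs (some (index - (rE:Int))) (some (index + (rE:Int) + 2))).length
            = 2*rE + 2 := by
          have := slice_length_of_range cs (index - rE) (index + rE + 2) (by omega) (by omega) (by omega)
          omega
        rw [hBodd, hBeven, hloddN, hlevenN]
        have hosz : (pvA_odd cs index cs.length 1 1).2 = 2 * (rN:Int) + 1 := by omega
        have hesz : (pvA_even cs index cs.length 1 2).2 = 2 * (rE:Int) + 2 := by omega
        rw [hosz, hesz]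
        by_cases hcmp : 2*rE + 2 > 2*rN + 1
        · rw [if_pos (show (2:Int) * rE + 2 > 2 * (rN:Int) + 1 from by omega), if_pos hcmp]
          have e1 : index - jF + 1 = index - (rE:Int) := by omega
          have e2 : index - jF + 1 + (2 * (rE:Int) + 2) = index + (rE:Int) + 2 := by omega
          rw [e1]
          rw [show index - (rE:Int) + (2 * (rE:Int) + 2) = index + (rE:Int) + 2 from by ring]
        · rw [if_neg (show ¬ ((2:Int) * rE + 2 > 2 * (rN:Int) + 1) from by omega), if_neg hcmp]
          have e1 : index - iF + 1 = index - (rN:Int) := by omega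
          rw [e1]
          rw [show index - (rN:Int) + (2 * (rN:Int) + 1) = index + (rN:Int) + 1 from by ring]
      · -- even branch not taken: evensize = -1; B's even scan finds no palindrome
        rw [if_neg hev]
        have hBeven : pvB_longest cs index 2 ((min index ((cs.length:Int) - 2 - index)) + 1).toNat = [] := by
          apply pvB_longest_nil
          intro k hk hpal
          rw [pal_slice_iff2 cs index k (by omega) (by omega)] at hpal
          have := hpal 0 (by omega)
          norm_num at this
          exact hev ⟨by omega, this⟩
        rw [hBodd, hBeven, hloddN]
        have hosz : (pvA_odd cs index cs.length 1 1).2 = 2 * (rN:Int) + 1 := by omega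
        rw [hosz]
        rw [if_neg (show ¬ ((-1:Int) > 2 * (rN:Int) + 1) from by omega),
            if_neg (show ¬ (([] : List Char).length > 2*rN + 1) from by simp)]
        have e1 : index - iF + 1 = index - (rN:Int) := by omega
        rw [e1]
        rw [show index - (rN:Int) + (2 * (rN:Int) + 1) = index + (rN:Int) + 1 from by ring]
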